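-- pv_equiv track=rewrite | github.com/IoTS-P/SEmu-Fuzz | semu_fuzz/emulate/semu/rule.py | limit_change_to_bits_selected
-- ===== SOURCE A (Python) =====
-- def set_one_bit(raw, bit_shift, bit_value):
--     '''
--     set raw[bit_shift] = bit_value.
--     '''
--     raw_bit = (raw >> bit_shift) & 1
--     if raw_bit != bit_value:
--         raw ^= (1 << bit_shift)
--     return raw
--
-- def limit_change_to_bits_selected(bits, value_raw, value_after):
--     '''
--     set value_raw[bits] = value_after[bits]
--     '''
--     value_raw_protect = value_raw
--     if bits != '*':
--         for i in range(len(bits)):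
--             bit = bits[-i-1]
--             value_raw = set_one_bit(value_raw, bit, (value_after >> i) & 1)
--         value_after = value_raw
--     return value_raw_protect, value_after
-- ===== SOURCE B (Python) =====
-- def limit_change_to_bits_selected(bits, value_raw, value_after):
--     '''
--     set value_raw[bits] = value_after[bits]
--     '''
--     if bits == '*':
--         return value_raw, value_after
--     mask = 0
--     scattered = 0
--     for i in range(len(bits)):
--         pos = bits[-i-1]
--         b = 1 << pos
--         mask |= b
--         scattered = (scattered & ~b) | (((value_after >> i) & 1) << pos)
--     patched = (value_raw & ~mask) | scattered
--     return value_raw, patched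
-- ===== Notes on version B (the rewrite author's own statement) =====
-- stated objective: alternative
-- what changed: B replaces A's per-bit read-compare-xor helper (set_one_bit called once per selected bit, rewriting value_raw each iteration) with one pass that accumulates a bit mask and a scattered-bits integer and applies a single masked patch (value_raw & ~mask) | scattered at the end; set_one_bit disappears.
import Mathlib
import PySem

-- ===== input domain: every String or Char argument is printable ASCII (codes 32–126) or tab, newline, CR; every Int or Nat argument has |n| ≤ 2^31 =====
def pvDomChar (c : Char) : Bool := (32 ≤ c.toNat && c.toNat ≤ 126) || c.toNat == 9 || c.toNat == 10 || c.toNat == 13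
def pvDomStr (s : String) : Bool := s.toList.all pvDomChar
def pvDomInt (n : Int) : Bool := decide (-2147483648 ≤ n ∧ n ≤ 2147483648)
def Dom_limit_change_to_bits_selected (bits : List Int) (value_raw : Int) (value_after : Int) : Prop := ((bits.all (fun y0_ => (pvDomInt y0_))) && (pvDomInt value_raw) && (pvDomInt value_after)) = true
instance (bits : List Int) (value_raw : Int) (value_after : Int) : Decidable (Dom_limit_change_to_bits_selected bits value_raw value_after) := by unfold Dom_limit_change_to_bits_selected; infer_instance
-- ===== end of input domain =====

-- B accumulates a bit mask and a scattered-bits integer in one pass and applies a single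
-- masked patch at the end, instead of A's per-bit read/compare/xor helper; same cost, different decomposition.


-- ===== PORT A =====
-- set raw[bit_shift] = bit_value; `.toNat` on the shift counts is exact on Pre_ (all bits ≥ 0;
-- Python raises ValueError on a negative shift count, which Pre_ excludes).
def set_one_bit (raw : Int) (bit_shift : Int) (bit_value : Int) : Int :=
  let raw_bit := PySem.Int.band (raw >>> bit_shift.toNat) 1
  if raw_bit ≠ bit_value then PySem.Int.bxor raw ((1 : Int) <<< bit_shift.toNat) else raw

-- `bits` is typed List Int here, so Python's `bits != '*'` is always True and the branch body always runs.
def limit_change_to_bits_selected (bits : List Int) (value_raw : Int) (value_after : Int) : Int × Int :=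
  let value_raw_protect := value_raw
  let vr := (PySem.List.pyRange 0 (bits.length : Int) 1).foldl
    (fun vr i =>
      let bit := PySem.List.pyGetD bits (-i - 1) 0
      set_one_bit vr bit (PySem.Int.band (value_after >>> i.toNat) 1)) value_raw
  (value_raw_protect, vr)

-- ===== PORT B =====
def limit_change_to_bits_selected_alt (bits : List Int) (value_raw : Int) (value_after : Int) : Int × Int :=
  let ms := (PySem.List.pyRange 0 (bits.length : Int) 1).foldl
    (fun (ms : Int × Int) i =>
      let pos := PySem.List.pyGetD bits (-i - 1) 0
      let b := (1 : Int) <<< pos.toNat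
      (PySem.Int.bor ms.1 b,
       PySem.Int.bor (PySem.Int.band ms.2 (Int.not b))
         ((PySem.Int.band (value_after >>> i.toNat) 1) <<< pos.toNat)))
    (0, 0)
  let patched := PySem.Int.bor (PySem.Int.band value_raw (Int.not ms.1)) ms.2
  (value_raw, patched)

-- ===== PRECONDITION & SPEC =====
-- Pre_ excludes exactly the inputs with a negative bit position, on which Python's `1 << bit` /
-- `raw >> bit` raise ValueError ("negative shift count") in A (and in B alike).
def Pre_limit_change_to_bits_selected (bits : List Int) (value_raw : Int) (value_after : Int) : Prop :=
  ∀ x ∈ bits, 0 ≤ x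
instance (bits : List Int) (value_raw : Int) (value_after : Int) : Decidable (Pre_limit_change_to_bits_selected bits value_raw value_after) := by unfold Pre_limit_change_to_bits_selected; infer_instance
def pvWitness_limit_change_to_bits_selected : List Int × Int × Int := ([1, 3, 0], 5, 6)

def Spec_limit_change_to_bits_selected (bits : List Int) (value_raw : Int) (value_after : Int) (out : Int × Int) : Prop := out = limit_change_to_bits_selected_alt bits value_raw value_after
instance (bits : List Int) (value_raw : Int) (value_after : Int) (out : Int × Int) : Decidable (Spec_limit_change_to_bits_selected bits value_raw value_after out) := by unfold Spec_limit_change_to_bits_selected; infer_instance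

-- ===== CLAIM (what is proved, stated in full; the proofs are below) =====
def Claim_equal_limit_change_to_bits_selected : Prop := ∀ (bits : List Int) (value_raw : Int) (value_after : Int), Dom_limit_change_to_bits_selected bits value_raw value_after → Pre_limit_change_to_bits_selected bits value_raw value_after → Spec_limit_change_to_bits_selected bits value_raw value_after (limit_change_to_bits_selected bits value_raw value_after)

-- ===== LEMMAS AND PROOFS =====

-- Nat: the AND and the set-difference of the bits of m partition m.
theorem pv_land_add_ldiff (m n : Nat) : (m &&& n) + Nat.ldiff m n = m := by
  induction m using Nat.binaryRec' generalizing n with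
  | zero => simp [Nat.zero_and, Nat.ldiff, Nat.bitwise_zero_left]
  | bit a m' _ ih =>
    cases n using Nat.bitCasesOn with
    | bit b n' =>
      rw [Nat.land_bit, Nat.ldiff_bit, Nat.bit_val, Nat.bit_val, Nat.bit_val]
      have := ih n'
      cases a <;> cases b <;> simp <;> omega

theorem pv_sub_land (m n : Nat) : m - (m &&& n) = Nat.ldiff m n := by
  have := pv_land_add_ldiff m n; omega

theorem pv_ofNat_nonneg (n : Nat) : (0 : Int) ≤ Int.ofNat n := Int.natCast_nonneg n
theorem pv_negSucc_neg (n : Nat) : ¬ ((0 : Int) ≤ Int.negSucc n) := by rw [Int.negSucc_eq]; omega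
theorem pv_negSucc_aux (n : Nat) : (-(Int.negSucc n) - 1).toNat = n := by rw [Int.negSucc_eq]; omega
theorem pv_ofNat_toNat (n : Nat) : (Int.ofNat n).toNat = n := rfl

-- Bridges: PySem's Python-exact bitwise ops are Mathlib's land/lor/xor; Int.not is Int.lnot.
theorem pv_band_eq_land (a b : Int) : PySem.Int.band a b = Int.land a b := by
  cases a with
  | ofNat m => cases b with
    | ofNat n =>
      unfold PySem.Int.band
      rw [if_pos (pv_ofNat_nonneg m), if_pos (pv_ofNat_nonneg n)]; rfl
    | negSucc n =>
      unfold PySem.Int.band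
      rw [if_pos (pv_ofNat_nonneg m), if_neg (pv_negSucc_neg n),
        pv_negSucc_aux, pv_ofNat_toNat, pv_sub_land]; rfl
  | negSucc m => cases b with
    | ofNat n =>
      unfold PySem.Int.band
      rw [if_neg (pv_negSucc_neg m), if_pos (pv_ofNat_nonneg n),
        pv_negSucc_aux, pv_ofNat_toNat, pv_sub_land]; rfl
    | negSucc n =>
      unfold PySem.Int.band
      rw [if_neg (pv_negSucc_neg m), if_neg (pv_negSucc_neg n),
        pv_negSucc_aux, pv_negSucc_aux]
      show _ = Int.negSucc (m ||| n)
      rw [Int.negSucc_eq]; omega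

theorem pv_bor_eq_lor (a b : Int) : PySem.Int.bor a b = Int.lor a b := by
  cases a with
  | ofNat m => cases b with
    | ofNat n =>
      unfold PySem.Int.bor
      rw [if_pos (pv_ofNat_nonneg m), if_pos (pv_ofNat_nonneg n)]; rfl
    | negSucc n =>
      unfold PySem.Int.bor
      rw [if_pos (pv_ofNat_nonneg m), if_neg (pv_negSucc_neg n),
        pv_negSucc_aux, pv_ofNat_toNat, pv_sub_land n m]
      show _ = Int.negSucc (Nat.ldiff n m)
      rw [Int.negSucc_eq]; omega
  | negSucc m => cases b with
    | ofNat n =>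
      unfold PySem.Int.bor
      rw [if_neg (pv_negSucc_neg m), if_pos (pv_ofNat_nonneg n),
        pv_negSucc_aux, pv_ofNat_toNat, pv_sub_land m n]
      show _ = Int.negSucc (Nat.ldiff m n)
      rw [Int.negSucc_eq]; omega
    | negSucc n =>
      unfold PySem.Int.bor
      rw [if_neg (pv_negSucc_neg m), if_neg (pv_negSucc_neg n),
        pv_negSucc_aux, pv_negSucc_aux]
      show _ = Int.negSucc (m &&& n)
      rw [Int.negSucc_eq]; omega

theorem pv_bxor_eq_xor (a b : Int) : PySem.Int.bxor a b = Int.xor a b := by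
  cases a with
  | ofNat m => cases b with
    | ofNat n =>
      unfold PySem.Int.bxor
      rw [if_pos (pv_ofNat_nonneg m), if_pos (pv_ofNat_nonneg n)]; rfl
    | negSucc n =>
      unfold PySem.Int.bxor
      rw [if_pos (pv_ofNat_nonneg m), if_neg (pv_negSucc_neg n),
        pv_negSucc_aux, pv_ofNat_toNat]
      show _ = Int.negSucc (m ^^^ n)
      rw [Int.negSucc_eq]; omega
  | negSucc m => cases b with
    | ofNat n =>
      unfold PySem.Int.bxor
      rw [if_neg (pv_negSucc_neg m), if_pos (pv_ofNat_nonneg n),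
        pv_negSucc_aux, pv_ofNat_toNat]
      show _ = Int.negSucc (m ^^^ n)
      rw [Int.negSucc_eq]; omega
    | negSucc n =>
      unfold PySem.Int.bxor
      rw [if_neg (pv_negSucc_neg m), if_neg (pv_negSucc_neg n),
        pv_negSucc_aux, pv_negSucc_aux]; rfl

theorem pv_not_eq_lnot (a : Int) : Int.not a = Int.lnot a := by
  cases a <;> rfl

theorem pv_testBit_ofNat (m k : Nat) : (Int.ofNat m).testBit k = m.testBit k := rfl
theorem pv_testBit_negSucc (m k : Nat) : (Int.negSucc m).testBit k = !(m.testBit k) := rfl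

-- Int extensionality by bits.
theorem pv_int_eq_of_testBit_eq (a b : Int) (h : ∀ k, a.testBit k = b.testBit k) : a = b := by
  cases a with
  | ofNat m => cases b with
    | ofNat n =>
      have : m = n := Nat.eq_of_testBit_eq (fun k => by
        have := h k; rwa [pv_testBit_ofNat, pv_testBit_ofNat] at this)
      simp [this]
    | negSucc n =>
      exfalso
      have hk := h (m + n)
      have h1 : m < 2 ^ (m + n) := lt_of_le_of_lt (Nat.le_add_right m n) Nat.lt_two_pow_self
      have h2 : n < 2 ^ (m + n) := lt_of_le_of_lt (Nat.le_add_left n m) Nat.lt_two_pow_self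
      rw [pv_testBit_ofNat, pv_testBit_negSucc, Nat.testBit_eq_false_of_lt h1,
        Nat.testBit_eq_false_of_lt h2] at hk
      exact Bool.false_ne_true hk
  | negSucc m => cases b with
    | ofNat n =>
      exfalso
      have hk := h (m + n)
      have h1 : m < 2 ^ (m + n) := lt_of_le_of_lt (Nat.le_add_right m n) Nat.lt_two_pow_self
      have h2 : n < 2 ^ (m + n) := lt_of_le_of_lt (Nat.le_add_left n m) Nat.lt_two_pow_self
      rw [pv_testBit_ofNat, pv_testBit_negSucc, Nat.testBit_eq_false_of_lt h1,
        Nat.testBit_eq_false_of_lt h2] at hk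
      exact Bool.false_ne_true hk.symm
    | negSucc n =>
      have : m = n := Nat.eq_of_testBit_eq (fun k => by
        have := h k; rw [pv_testBit_negSucc, pv_testBit_negSucc] at this
        simpa using this)
      simp [this]

theorem pv_testBit_zero_int (k : Nat) : (0 : Int).testBit k = false := by
  rw [show (0 : Int) = Int.ofNat 0 from rfl, pv_testBit_ofNat, Nat.zero_testBit]

theorem pv_shiftLeft_ofNat (m p : Nat) : (Int.ofNat m) <<< p = Int.ofNat (m <<< p) := rfl
theorem pv_shiftRight_ofNat (m p : Nat) : (Int.ofNat m) >>> p = Int.ofNat (m >>> p) := rfl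
theorem pv_shiftRight_negSucc (m p : Nat) : (Int.negSucc m) >>> p = Int.negSucc (m >>> p) := rfl

theorem pv_testBit_one_shiftLeft (p k : Nat) : ((1 : Int) <<< p).testBit k = decide (p = k) := by
  rw [show (1 : Int) = Int.ofNat 1 from rfl, pv_shiftLeft_ofNat, pv_testBit_ofNat,
    Nat.one_shiftLeft, Nat.testBit_two_pow]

theorem pv_zero_shiftLeft (p : Nat) : ((0 : Int) <<< p) = 0 := by
  rw [show (0 : Int) = Int.ofNat 0 from rfl, pv_shiftLeft_ofNat, Nat.zero_shiftLeft]

theorem pv_testBit_shiftRight_int (x : Int) (p k : Nat) : (x >>> p).testBit k = x.testBit (p + k) := by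
  cases x with
  | ofNat m => rw [pv_shiftRight_ofNat, pv_testBit_ofNat, pv_testBit_ofNat, Nat.testBit_shiftRight]
  | negSucc m =>
    rw [pv_shiftRight_negSucc, pv_testBit_negSucc, pv_testBit_negSucc, Nat.testBit_shiftRight]

theorem pv_testBit_one (k : Nat) : (1 : Int).testBit k = decide (0 = k) := by
  rw [show (1 : Int) = Int.ofNat 1 from rfl, pv_testBit_ofNat,
    show (1 : Nat) = 2 ^ 0 by norm_num, Nat.testBit_two_pow]

-- (x & 1) is the lowest bit of x, as 0 or 1.
theorem pv_lowbit (x : Int) : PySem.Int.band x 1 = cond (x.testBit 0) 1 0 := by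
  rw [pv_band_eq_land]
  apply pv_int_eq_of_testBit_eq
  intro k
  rw [Int.testBit_land, pv_testBit_one]
  cases hx : x.testBit 0 with
  | false =>
    cases k with
    | zero => rw [cond_false, pv_testBit_zero_int]; simp [hx]
    | succ k' => rw [cond_false, pv_testBit_zero_int]; simp
  | true =>
    cases k with
    | zero => rw [cond_true, pv_testBit_one]; simp [hx]
    | succ k' => rw [cond_true, pv_testBit_one]; simp

-- set_one_bit writes bit s of raw to bv (bv ∈ {0,1}): it is the masked update.
theorem pv_set_one_bit_spec (raw s bv : Int) (hbv : bv = 0 ∨ bv = 1) :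
    set_one_bit raw s bv =
      Int.lor (Int.land raw (Int.lnot ((1 : Int) <<< s.toNat))) (bv <<< s.toNat) := by
  unfold set_one_bit
  have hrb : PySem.Int.band (raw >>> s.toNat) 1 = cond (raw.testBit s.toNat) 1 0 := by
    rw [pv_lowbit, pv_testBit_shiftRight_int, Nat.add_zero]
  rw [hrb]
  rcases hbv with h | h <;> subst h <;> cases hr : raw.testBit s.toNat
  · -- bv = 0, bit is 0: no flip
    rw [cond_false, if_neg (by norm_num), pv_zero_shiftLeft]
    apply pv_int_eq_of_testBit_eq
    intro k
    rw [Int.testBit_lor, Int.testBit_land, Int.testBit_lnot, pv_testBit_one_shiftLeft,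
      pv_testBit_zero_int]
    by_cases hk : s.toNat = k
    · subst hk; simp [hr]
    · simp [hk]
  · -- bv = 0, bit is 1: flip down
    rw [cond_true, if_pos (by norm_num), pv_zero_shiftLeft, pv_bxor_eq_xor]
    apply pv_int_eq_of_testBit_eq
    intro k
    rw [Int.testBit_lxor, Int.testBit_lor, Int.testBit_land, Int.testBit_lnot,
      pv_testBit_one_shiftLeft, pv_testBit_zero_int]
    by_cases hk : s.toNat = k
    · subst hk; simp [hr]
    · simp [hk]
  · -- bv = 1, bit is 0: flip up
    rw [cond_false, if_pos (by norm_num), pv_bxor_eq_xor]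
    apply pv_int_eq_of_testBit_eq
    intro k
    rw [Int.testBit_lxor, Int.testBit_lor, Int.testBit_land, Int.testBit_lnot,
      pv_testBit_one_shiftLeft]
    by_cases hk : s.toNat = k
    · subst hk; simp [hr]
    · simp [hk]
  · -- bv = 1, bit is 1: no flip
    rw [cond_true, if_neg (by norm_num)]
    apply pv_int_eq_of_testBit_eq
    intro k
    rw [Int.testBit_lor, Int.testBit_land, Int.testBit_lnot, pv_testBit_one_shiftLeft]
    by_cases hk : s.toNat = k
    · subst hk; simp [hr]
    · simp [hk]

-- The loop invariant: A's running value is B's masked patch of the original value,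
-- and B's scattered bits live inside B's mask.
theorem pv_fold_inv (bits : List Int) (value_after : Int)
    (l : List Int) (v0 : Int) :
    ∀ (mask sc vr : Int),
      vr = Int.lor (Int.land v0 (Int.lnot mask)) sc →
      Int.land sc (Int.lnot mask) = 0 →
      (let rA := l.foldl (fun vr i =>
          let bit := PySem.List.pyGetD bits (-i - 1) 0
          set_one_bit vr bit (PySem.Int.band (value_after >>> i.toNat) 1)) vr
       let rB := l.foldl (fun (ms : Int × Int) i =>
          let pos := PySem.List.pyGetD bits (-i - 1) 0
          let b := (1 : Int) <<< pos.toNat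
          (PySem.Int.bor ms.1 b,
           PySem.Int.bor (PySem.Int.band ms.2 (Int.not b))
             ((PySem.Int.band (value_after >>> i.toNat) 1) <<< pos.toNat))) (mask, sc)
       rA = Int.lor (Int.land v0 (Int.lnot rB.1)) rB.2 ∧
         Int.land rB.2 (Int.lnot rB.1) = 0) := by
  induction l with
  | nil => intro mask sc vr hvr hsc; exact ⟨hvr, hsc⟩
  | cons i t ih =>
    intro mask sc vr hvr hsc
    simp only [List.foldl_cons]
    set pos := PySem.List.pyGetD bits (-i - 1) 0 with hposdef
    set p := pos.toNat with hp
    set bv := PySem.Int.band (value_after >>> i.toNat) 1 with hbvdef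
    have hbv : bv = 0 ∨ bv = 1 := by
      rw [hbvdef, pv_lowbit]
      cases (value_after >>> i.toNat).testBit 0 <;> simp
    have hsck : ∀ k, (sc.testBit k && !mask.testBit k) = false := by
      intro k
      have := congrArg (fun z => Int.testBit z k) hsc
      simpa [Int.testBit_land, Int.testBit_lnot, pv_testBit_zero_int] using this
    have hw : ∀ k, (bv <<< p).testBit k = (bv.testBit 0 && decide (p = k)) := by
      intro k
      rcases hbv with h | h <;> rw [h]
      · rw [pv_zero_shiftLeft, pv_testBit_zero_int, pv_testBit_zero_int]
        simp
      · rw [pv_testBit_one_shiftLeft,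
          show (1 : Int).testBit 0 = true from rfl, Bool.true_and]
    apply ih
    · -- new vr invariant
      rw [pv_set_one_bit_spec vr pos bv hbv, hvr]
      apply pv_int_eq_of_testBit_eq
      intro k
      simp only [pv_bor_eq_lor, pv_band_eq_land, pv_not_eq_lnot]
      simp only [Int.testBit_lor, Int.testBit_land, Int.testBit_lnot, hw k,
        pv_testBit_one_shiftLeft]
      have h := hsck k
      cases hv0 : v0.testBit k <;> cases hm : mask.testBit k <;>
        cases hs : sc.testBit k <;> cases hbit : bv.testBit 0 <;>
        by_cases hk : p = k <;> simp_all
    · -- scattered stays inside the mask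
      apply pv_int_eq_of_testBit_eq
      intro k
      simp only [pv_bor_eq_lor, pv_band_eq_land, pv_not_eq_lnot]
      simp only [Int.testBit_lor, Int.testBit_land, Int.testBit_lnot, hw k,
        pv_testBit_one_shiftLeft, pv_testBit_zero_int]
      have h := hsck k
      cases hm : mask.testBit k <;> cases hs : sc.testBit k <;>
        cases hbit : bv.testBit 0 <;> by_cases hk : p = k <;> simp_all

theorem pv_land_lnot_zero (v : Int) : Int.lor (Int.land v (Int.lnot 0)) 0 = v := by
  apply pv_int_eq_of_testBit_eq
  intro k
  simp [Int.testBit_lor, Int.testBit_land, Int.testBit_lnot, pv_testBit_zero_int]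

theorem pv_land_zero_lnot (x : Int) : Int.land 0 (Int.lnot x) = 0 := by
  apply pv_int_eq_of_testBit_eq
  intro k
  simp [Int.testBit_land, pv_testBit_zero_int]

-- ===== VERDICT (by name: the statement is the Claim_ definition above) =====
theorem limit_change_to_bits_selected_spec : Claim_equal_limit_change_to_bits_selected := by
  intro bits value_raw value_after _ _
  unfold Spec_limit_change_to_bits_selected
  unfold limit_change_to_bits_selected limit_change_to_bits_selected_alt
  simp only []
  have h := pv_fold_inv bits value_after (PySem.List.pyRange 0 (bits.length : Int) 1)
    value_raw 0 0 value_raw (pv_land_lnot_zero value_raw).symm (pv_land_zero_lnot 0)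
  simp only [] at h
  refine Prod.ext rfl ?_
  show _ = PySem.Int.bor (PySem.Int.band value_raw (Int.not _)) _
  rw [pv_bor_eq_lor, pv_band_eq_land, pv_not_eq_lnot]
  exact h.1
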